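-- pv_equiv track=rewrite | github.com/dev-mdirfan/Coding-Problem-Solutions | Work@Tech/Python/K-Subarray Sum.py | kSubarraySum3
-- ===== SOURCE A (Python) =====
-- from typing import List
--
-- def kSubarraySum3(A: List[int], k: int) -> List[int]:
--     ws = 0
--     wSum = 0
--     ans = []
--     for we in range(len(A)):
--         wSum += A[we]
--         # if we >= k-1:
--         if we-ws+1 == k:
--             ans.append(wSum)
--             wSum -= A[ws]
--             ws += 1
--     return ans
-- ===== SOURCE B (Python) =====
-- from typing import List
--
-- def kSubarraySum3(A: List[int], k: int) -> List[int]: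
--     if k <= 0:
--         return []
--     prefix = [0]
--     for x in A:
--         prefix.append(prefix[-1] + x)
--     return [prefix[i + k] - prefix[i] for i in range(len(A) - k + 1)]
-- ===== Notes on version B (the rewrite author's own statement) =====
-- stated objective: alternative
-- what changed: Replaces the incremental sliding-window (running sum with add/subtract and a moving window start) by a cumulative prefix-sum table built in one pass, with each window sum read off as a difference of two table entries.
import Mathlib
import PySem

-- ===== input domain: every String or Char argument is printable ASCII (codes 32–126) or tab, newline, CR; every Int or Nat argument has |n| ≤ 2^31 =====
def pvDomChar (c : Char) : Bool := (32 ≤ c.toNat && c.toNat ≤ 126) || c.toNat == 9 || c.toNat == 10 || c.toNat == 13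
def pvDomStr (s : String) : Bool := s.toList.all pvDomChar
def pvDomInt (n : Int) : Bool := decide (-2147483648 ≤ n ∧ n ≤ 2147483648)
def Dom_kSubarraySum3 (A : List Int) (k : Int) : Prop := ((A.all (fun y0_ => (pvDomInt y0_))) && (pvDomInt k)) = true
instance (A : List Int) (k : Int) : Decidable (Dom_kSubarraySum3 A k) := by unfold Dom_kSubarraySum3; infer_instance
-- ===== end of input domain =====

-- B replaces A's incremental sliding window by a prefix-sum table and window-end differences; same O(n) cost, different structure.

-- ===== PORT A =====
-- one iteration of A's loop body; state = (ws, wSum, ans)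
def pvStepA (A : List Int) (k : Int) (st : Int × Int × List Int) (we : Int) : Int × Int × List Int :=
  let ws := st.1
  let wSum := st.2.1 + PySem.List.pyGetD A we 0   -- A[we]; we ∈ range(len(A)) is always in range
  let ans := st.2.2
  if we - ws + 1 = k then
    (ws + 1, wSum - PySem.List.pyGetD A ws 0, ans ++ [wSum])   -- A[ws]; 0 ≤ ws ≤ we here
  else
    (ws, wSum, ans)

def kSubarraySum3 (A : List Int) (k : Int) : List Int :=
  ((PySem.List.pyRange 0 (A.length : Int) 1).foldl (pvStepA A k) (0, 0, [])).2.2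

-- ===== PORT B =====
-- prefix[-1] is acc.getLastD 0: acc starts as [0] and only grows, so it is never empty
def kSubarraySum3_alt (A : List Int) (k : Int) : List Int :=
  if k ≤ 0 then []
  else
    let pfx := A.foldl (fun acc x => acc ++ [acc.getLastD 0 + x]) [0]
    (PySem.List.pyRange 0 ((A.length : Int) - k + 1) 1).map
      (fun i => PySem.List.pyGetD pfx (i + k) 0 - PySem.List.pyGetD pfx i 0)

-- ===== PRECONDITION & SPEC =====
def Spec_kSubarraySum3 (A : List Int) (k : Int) (out : List Int) : Prop := out = kSubarraySum3_alt A k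
instance (A : List Int) (k : Int) (out : List Int) : Decidable (Spec_kSubarraySum3 A k out) := by unfold Spec_kSubarraySum3; infer_instance

-- ===== CLAIM (what is proved, stated in full; the proofs are below) =====
def Claim_equal_kSubarraySum3 : Prop := ∀ (A : List Int) (k : Int), Dom_kSubarraySum3 A k → Spec_kSubarraySum3 A k (kSubarraySum3 A k)

-- ===== LEMMAS AND PROOFS =====

-- prefix sum of the first i elements
def pvP (A : List Int) (i : Nat) : Int := (A.take i).sum

theorem pv_sum_take_succ (A : List Int) (n : Nat) (h : n < A.length) :
    pvP A (n + 1) = pvP A n + A[n] := by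
  unfold pvP
  exact List.sum_take_succ A n h

theorem pv_pyRange_zero (m : Int) :
    PySem.List.pyRange 0 m 1 = (List.range m.toNat).map (Nat.cast : Nat → Int) := by
  rcases m with n | n
  · simpa using PySem.List.pyRange_zero_natCast n
  · simp [PySem.List.pyRange]

-- B's prefix-building fold, characterised for any nonempty accumulator
theorem pv_prefix_fold (L : List Int) : ∀ (acc : List Int) (s : Int), acc.getLastD 0 = s →
    L.foldl (fun acc x => acc ++ [acc.getLastD 0 + x]) acc
      = acc ++ (List.range L.length).map (fun i => s + (L.take (i + 1)).sum) := by
  induction L with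
  | nil => intro acc s _; simp
  | cons x t ih =>
    intro acc s hs
    have hlast : (acc ++ [acc.getLastD 0 + x]).getLastD 0 = s + x := by
      rw [← hs]; simp
    calc (x :: t).foldl (fun acc x => acc ++ [acc.getLastD 0 + x]) acc
        = t.foldl (fun acc x => acc ++ [acc.getLastD 0 + x]) (acc ++ [acc.getLastD 0 + x]) := by
          simp
      _ = acc ++ [s + x] ++ (List.range t.length).map (fun i => (s + x) + (t.take (i + 1)).sum) := by
          rw [ih _ _ hlast, hs]
      _ = acc ++ (List.range (x :: t).length).map (fun i => s + ((x :: t).take (i + 1)).sum) := by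
          simp only [List.length_cons, List.range_succ_eq_map, List.map_cons, List.map_map]
          simp [Function.comp_def, add_assoc]

theorem pv_pfx_eq (A : List Int) :
    A.foldl (fun acc x => acc ++ [acc.getLastD 0 + x]) [0]
      = (List.range (A.length + 1)).map (pvP A) := by
  rw [pv_prefix_fold A [0] 0 (by simp)]
  simp only [List.range_succ_eq_map, List.map_cons, List.map_map]
  simp [pvP, Function.comp_def]

-- A's loop for non-positive k: the window condition never fires
theorem pv_loopA_nonpos (A : List Int) (k : Int) (hk : k ≤ 0) :
    ∀ n : Nat, n ≤ A.length →
      (PySem.List.pyRange 0 (n : Int) 1).foldl (pvStepA A k) (0, 0, [])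
        = (0, pvP A n, []) := by
  intro n
  induction n with
  | zero => intro _; simp [PySem.List.pyRange, pvP]
  | succ n ih =>
    intro hn
    have h1 : ((n + 1 : Nat) : Int) = (n : Int) + 1 := by push_cast; ring
    rw [h1, PySem.List.pyRange_one_succ_right (by positivity), List.foldl_append,
        ih (by omega)]
    have hlt : n < A.length := by omega
    simp only [List.foldl_cons, List.foldl_nil, pvStepA]
    rw [if_neg (by omega)]
    rw [PySem.List.pyGetD_natCast, List.getD_eq_getElem A 0 hlt, pv_sum_take_succ A n hlt]

-- A's loop for positive k: full invariant (window start, running sum, answers so far)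
theorem pv_loopA_pos (A : List Int) (k : Int) (hk : 0 < k) :
    ∀ n : Nat, n ≤ A.length →
      (PySem.List.pyRange 0 (n : Int) 1).foldl (pvStepA A k) (0, 0, [])
        = (max 0 ((n : Int) + 1 - k),
           pvP A n - pvP A ((n : Int) + 1 - k).toNat,
           (List.range ((n : Int) + 1 - k).toNat).map
             (fun i => pvP A (i + k.toNat) - pvP A i)) := by
  intro n
  induction n with
  | zero =>
    intro _
    have h0 : ((1 : Int) - k).toNat = 0 := by omega
    simp [PySem.List.pyRange, pvP, h0]
    omega
  | succ n ih =>
    intro hn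
    have hlt : n < A.length := by omega
    have h1 : ((n + 1 : Nat) : Int) = (n : Int) + 1 := by push_cast; ring
    rw [h1, PySem.List.pyRange_one_succ_right (by positivity), List.foldl_append,
        ih (by omega)]
    simp only [List.foldl_cons, List.foldl_nil, pvStepA]
    by_cases hkn : k ≤ (n : Int) + 1
    · -- the window condition fires at we = n
      have hw : max 0 ((n : Int) + 1 - k) = (n : Int) + 1 - k := by omega
      have hwnat : (((n : Int) + 1 - k).toNat : Int) = (n : Int) + 1 - k := by omega
      rw [hw, if_pos (by omega)]
      have hwlt : ((n : Int) + 1 - k).toNat < A.length := by omega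
      have hsucc : ((n : Int) + 1 + 1 - k).toNat = ((n : Int) + 1 - k).toNat + 1 := by omega
      have hik : ((n : Int) + 1 - k).toNat + k.toNat = n + 1 := by omega
      rw [PySem.List.pyGetD_natCast, List.getD_eq_getElem A 0 hlt,
          PySem.List.pyGetD_eq_getElem A 0 (by omega) (by omega)]
      refine Prod.ext ?_ (Prod.ext ?_ ?_)
      · simp; omega
      · simp only
        rw [pv_sum_take_succ A n hlt, hsucc,
            pv_sum_take_succ A (((n : Int) + 1 - k).toNat) hwlt]
        ring
      · simp only [hsucc, List.range_succ, List.map_append, List.map_cons, List.map_nil,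
          hik]
        rw [pv_sum_take_succ A n hlt]
        congr 2
        ring
    · -- k > n+1: condition cannot fire yet
      have hw : max 0 ((n : Int) + 1 - k) = 0 := by omega
      have h0 : ((n : Int) + 1 - k).toNat = 0 := by omega
      have h0' : ((n : Int) + 1 + 1 - k).toNat = 0 := by omega
      rw [hw, if_neg (by omega)]
      rw [PySem.List.pyGetD_natCast, List.getD_eq_getElem A 0 hlt]
      refine Prod.ext ?_ (Prod.ext ?_ ?_)
      · simp; omega
      · simp only [h0, h0']
        rw [pv_sum_take_succ A n hlt]
        simp [pvP]
      · simp [h0, h0']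

-- ===== VERDICT (by name: the statement is the Claim_ definition above) =====
theorem kSubarraySum3_spec : Claim_equal_kSubarraySum3 := by
  unfold Claim_equal_kSubarraySum3 Spec_kSubarraySum3
  intro A k _
  unfold kSubarraySum3 kSubarraySum3_alt
  by_cases hk : k ≤ 0
  · rw [pv_loopA_nonpos A k hk A.length le_rfl, if_pos hk]
  · rw [not_le] at hk
    rw [pv_loopA_pos A k hk A.length le_rfl, if_neg (by omega)]
    simp only
    rw [pv_pfx_eq A, pv_pyRange_zero, List.map_map]
    have hM : ((A.length : Int) - k + 1).toNat = ((A.length : Int) + 1 - k).toNat := by omega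
    rw [hM]
    apply List.map_congr_left
    intro i hi
    rw [List.mem_range] at hi
    have hiA : i + k.toNat ≤ A.length := by omega
    have hcast : (i : Int) + k = ((i + k.toNat : Nat) : Int) := by omega
    simp only [Function.comp_apply, hcast]
    rw [PySem.List.pyGetD_natCast, PySem.List.pyGetD_natCast,
        PySem.List.getD_map_range _ _ _ _ (by omega),
        PySem.List.getD_map_range _ _ _ _ (by omega)]
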